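-- pv_equiv track=rewrite | github.com/riruriruriru/sisteco | sisteco.py | descifrar
-- ===== SOURCE A (Python) =====
-- def descifrar(cipherText, key):
-- 	cipherText = decodificar(cipherText,key,0)#se decodifica el texto utilizando la llave original
-- 	offset = 0
-- 	iteraciones = len(key)/2
-- 	contador = 0
-- 	offset = 0
-- 	decodificado = []
-- 	keys = []
-- 	arreglo = []
-- 	decodificado = cipherText[:]
-- 	keys = key
-- 	offset = len(keys)
-- 	while contador < int(iteraciones):
-- 		newKey = keys[offset-2:offset]#se recorre la llave de 2 en 2
-- 		offset -= 2
-- 		contador += 1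
-- 		decodificado = decodificar(decodificado, newKey, 0)#utilizando estas llaves parciales, se decodifica
-- 	offset = len(keys)
-- 	contador = 0
-- 	decodificadoR = decodificado[::-1]#se invierte el sentido del texto parcial decodificado
-- 	while contador < int(iteraciones):#se repite proceso anterior con llaves parciales
-- 		newKey = keys[offset-2:offset]
-- 		offset -= 2
-- 		contador += 1
-- 		decodificadoR = decodificar(decodificadoR, newKey, 0)
-- 	decodificadoR = decodificar(decodificadoR, key, 0)#se decodifica una ultima vez con llave original
-- 	return decodificadoR
--
-- def decodificar(cipherText, key, offset):
-- 	decodificado = cipherText[:]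
-- 	newKey = []
-- 	contador = 0
-- 	if(len(key)<1):
-- 		return decodificado
-- 	if offset*len(key)>=len(decodificado):
-- 		return decodificado
-- 	for cont in range(0, len(decodificado)):
-- 		if cont+offset*len(key)>=len(decodificado):
-- 			return decodificado
-- 		if contador== len(key):
-- 			contador = 0
-- 		if decodificado[cont]-key[contador]>=0:
-- 			newKey.append(decodificado[cont])
-- 			decodificado[cont] = (decodificado[cont] - key[contador]-1)%(128)
-- 			contador+=1
-- 		else:
-- 			newKey.append(decodificado[cont])
-- 			decodificado[cont] = (decodificado[cont] - key[contador]+128-1)%128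
-- 			contador+=1
-- 	offset+=1
-- 	return decodificado
-- ===== SOURCE B (Python) =====
-- def descifrar(cipherText, key):
--     # Each decoding pass subtracts (key element + 1) mod 128 per position; accumulate
--     # all passes' shifts in closed form and apply them in a single pass.
--     n = len(cipherText)
--     m = len(key)
--     if m == 0:
--         return cipherText[::-1]
--     it = m // 2
--     # parity sums of the partial 2-element key passes
--     p0 = 0
--     p1 = 0
--     for t in range(it):
--         p0 += key[m - 2*t - 2] + 1
--         p1 += key[m - 2*t - 1] + 1
--     ps = (p0, p1)
--     out = []
--     for j in range(n):
--         i = n - 1 - j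
--         s = key[i % m] + 1 + ps[i % 2] + ps[j % 2] + key[j % m] + 1
--         out.append((cipherText[i] - s) % 128)
--     return out
-- ===== Notes on version B (the rewrite author's own statement) =====
-- stated objective: faster
-- what changed: Each decoding pass only subtracts (key element + 1) mod 128 per position, so B accumulates the total per-position shift of all len(key)/2+2 passes in closed form (two parity sums for the 2-element partial keys) and applies it in one pass over the reversed text, instead of A's repeated full-list decoding passes.
import Mathlib
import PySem

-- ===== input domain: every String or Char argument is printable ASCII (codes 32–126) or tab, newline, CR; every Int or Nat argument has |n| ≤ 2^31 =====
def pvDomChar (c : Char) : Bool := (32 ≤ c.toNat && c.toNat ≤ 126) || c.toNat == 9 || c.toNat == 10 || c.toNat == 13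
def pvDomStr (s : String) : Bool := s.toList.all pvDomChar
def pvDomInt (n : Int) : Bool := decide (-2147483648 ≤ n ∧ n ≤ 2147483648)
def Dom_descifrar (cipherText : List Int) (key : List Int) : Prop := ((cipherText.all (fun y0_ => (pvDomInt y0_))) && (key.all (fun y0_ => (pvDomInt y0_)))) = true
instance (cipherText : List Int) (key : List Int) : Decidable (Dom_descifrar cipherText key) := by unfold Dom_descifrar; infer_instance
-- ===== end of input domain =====

-- B replaces A's repeated full-list decoding passes by one pass with per-position
-- shifts accumulated in closed form (objective: faster, O(n+k) vs O(n*k)).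

-- ===== PORT A =====
-- the for-loop of decodificar: mutates decodificado[cont] in place, cont = 0..len-1
-- (list indexing decodificado[cont]/key[contador] is always in range along A's
-- executions, so it is ported with getD)
def decodLoop (dec : List Int) (key : List Int) (offset : Int) (cont contador : Nat) : List Int :=
  if _h : cont < dec.length then
    if (cont : Int) + offset * key.length ≥ (dec.length : Int) then dec
    else
      let contador' := if contador = key.length then 0 else contador
      let x := dec.getD cont 0
      if x - key.getD contador' 0 ≥ 0 then
        decodLoop (dec.set cont (PySem.Int.mod (x - key.getD contador' 0 - 1) 128)) key offset (cont + 1) (contador' + 1)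
      else
        decodLoop (dec.set cont (PySem.Int.mod (x - key.getD contador' 0 + 128 - 1) 128)) key offset (cont + 1) (contador' + 1)
  else dec
termination_by dec.length - cont
decreasing_by all_goals simp [List.length_set]; omega

def decodificar (cipherText : List Int) (key : List Int) (offset : Int) : List Int :=
  if key.length < 1 then cipherText
  else if offset * key.length ≥ (cipherText.length : Int) then cipherText
  else decodLoop cipherText key offset 0 0

-- one 'while contador < int(iteraciones)' loop of descifrar
def descLoop (keys : List Int) (dec : List Int) (offset : Int) (contador iteraciones : Nat) : List Int :=
  if contador < iteraciones then
    descLoop keys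
      (decodificar dec (PySem.List.slice keys (some (offset - 2)) (some offset)) 0)
      (offset - 2) (contador + 1) iteraciones
  else dec
termination_by iteraciones - contador

def descifrar (cipherText : List Int) (key : List Int) : List Int :=
  let ct := decodificar cipherText key 0
  let iteraciones := key.length / 2     -- int(len(key)/2)
  let decodificado := descLoop key ct (key.length : Int) 0 iteraciones
  let decodificadoR := decodificado.reverse   -- [::-1]
  let decodificadoR2 := descLoop key decodificadoR (key.length : Int) 0 iteraciones
  decodificar decodificadoR2 key 0

-- ===== PORT B =====
def descifrar_alt (cipherText : List Int) (key : List Int) : List Int :=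
  let n := cipherText.length
  let m := key.length
  if m = 0 then cipherText.reverse
  else
    let it := m / 2
    let ps := (List.range it).foldl
      (fun (p : Int × Int) t =>
        (p.1 + key.getD (m - 2 * t - 2) 0 + 1, p.2 + key.getD (m - 2 * t - 1) 0 + 1))
      (0, 0)
    (List.range n).map (fun j =>
      let i := n - 1 - j
      let s := key.getD (i % m) 0 + 1 + (if i % 2 = 0 then ps.1 else ps.2)
               + (if j % 2 = 0 then ps.1 else ps.2) + key.getD (j % m) 0 + 1
      PySem.Int.mod (cipherText.getD i 0 - s) 128)

-- ===== PRECONDITION & SPEC =====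
def Spec_descifrar (cipherText : List Int) (key : List Int) (out : List Int) : Prop := out = descifrar_alt cipherText key
instance (cipherText : List Int) (key : List Int) (out : List Int) : Decidable (Spec_descifrar cipherText key out) := by unfold Spec_descifrar; infer_instance

-- ===== CLAIM (what is proved, stated in full; the proofs are below) =====
def Claim_equal_descifrar : Prop := ∀ (cipherText : List Int) (key : List Int), Dom_descifrar cipherText key → Spec_descifrar cipherText key (descifrar cipherText key)

-- ===== LEMMAS AND PROOFS =====

-- Every decoding pass subtracts a per-position amount mod 128; shiftMap is that shape.
def shiftMap (f : Nat → Int) (xs : List Int) : List Int :=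
  xs.mapIdx (fun i x => PySem.Int.mod (x - f i) 128)

-- sum of the shifts of the partial 2-element key passes c..it-1, at parity p
def PS (key : List Int) (c it p : Nat) : Int :=
  if c < it then (key.getD (key.length - 2 * c - 2 + p) 0 + 1) + PS key (c + 1) it p
  else 0
termination_by it - c

lemma shiftMap_congr (f g : Nat → Int) (xs : List Int) (h : ∀ i, i < xs.length → f i = g i) :
    shiftMap f xs = shiftMap g xs := by
  unfold shiftMap
  apply List.ext_getElem
  · simp
  · intro i h1 h2
    simp at h1 ⊢
    rw [h i (by simpa using h1)]


lemma shiftMap_shiftMap (f g : Nat → Int) (xs : List Int) :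
    shiftMap f (shiftMap g xs) = shiftMap (fun i => g i + f i) xs := by
  unfold shiftMap
  apply List.ext_getElem
  · simp
  · intro i h1 h2
    simp
    omega


lemma shiftMap_reverse (f : Nat → Int) (xs : List Int) :
    (shiftMap f xs).reverse = shiftMap (fun j => f (xs.length - 1 - j)) xs.reverse := by
  unfold shiftMap
  apply List.ext_getElem
  · simp
  · intro i h1 h2
    simp at h1
    simp [List.getElem_reverse]
    have e : xs.length - 1 - (xs.length - 1 - (xs.length - 1 - i)) = xs.length - 1 - i := by omega
    rw [e]


lemma decodLoop_eq (key : List Int) (hm : 1 ≤ key.length) :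
    ∀ (fuel : Nat) (dec : List Int) (cont contador : Nat),
      dec.length - cont ≤ fuel → contador ≤ key.length →
      decodLoop dec key 0 cont contador =
        dec.take cont ++ (dec.drop cont).mapIdx
          (fun j x => PySem.Int.mod
            (x - key.getD (((if contador = key.length then 0 else contador) + j) % key.length) 0 - 1) 128) := by
  intro fuel
  induction fuel with
  | zero =>
    intro dec cont contador hf hcl
    have hge : ¬ cont < dec.length := by omega
    rw [decodLoop, dif_neg hge, List.drop_eq_nil_of_le (by omega),
        List.take_of_length_le (by omega)]
    simp
  | succ fuel ih =>
    intro dec cont contador hf hcl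
    by_cases hc : cont < dec.length
    · have hc0 : (if contador = key.length then 0 else contador) < key.length := by
        split_ifs with h
        · omega
        · omega
      set c0 : Nat := if contador = key.length then 0 else contador with hc0def
      rw [decodLoop, dif_pos hc, if_neg (by omega)]
      simp only
      have hval : PySem.Int.mod (dec.getD cont 0 - key.getD c0 0 + 128 - 1) 128
          = PySem.Int.mod (dec.getD cont 0 - key.getD c0 0 - 1) 128 := by
        rw [PySem.Int.mod_eq_emod_of_pos (show (0:Int) < 128 by norm_num),
            PySem.Int.mod_eq_emod_of_pos (show (0:Int) < 128 by norm_num)]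
        omega
      set v : Int := PySem.Int.mod (dec.getD cont 0 - key.getD c0 0 - 1) 128 with hv
      have hrec : ∀ b : Prop, ∀ _ : Decidable b,
        (if b then decodLoop (dec.set cont v) key 0 (cont+1) (c0+1)
         else decodLoop (dec.set cont v) key 0 (cont+1) (c0+1)) =
         decodLoop (dec.set cont v) key 0 (cont+1) (c0+1) := by intro b i; split_ifs <;> rfl
      rw [hval, hrec]
      rw [ih (dec.set cont v) (cont+1) (c0+1) (by simp [List.length_set]; omega) (by omega)]
      -- now pure list algebra
      rw [List.drop_eq_getElem_cons hc, List.mapIdx_cons]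
      have htake : (dec.set cont v).take (cont+1) = dec.take cont ++ [v] := by
        rw [List.set_eq_take_append_cons_drop, if_pos hc, List.take_append]
        simp [List.length_take, Nat.min_eq_left hc.le, List.take_of_length_le]
      have hdrop : (dec.set cont v).drop (cont+1) = dec.drop (cont+1) := by
        simp [List.drop_set]
      rw [htake, hdrop, List.append_assoc, List.singleton_append]
      have hfun : (fun (j : Nat) (x : Int) =>
            PySem.Int.mod (x - key.getD (((if c0 + 1 = key.length then 0 else c0 + 1) + j) % key.length) 0 - 1) 128)
          = (fun (i : Nat) (x : Int) =>
            PySem.Int.mod (x - key.getD ((c0 + (i + 1)) % key.length) 0 - 1) 128) := by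
        funext j x
        have hidx : ((if c0 + 1 = key.length then 0 else c0 + 1) + j) % key.length
            = (c0 + (j + 1)) % key.length := by
          by_cases h : c0 + 1 = key.length
          · rw [if_pos h]
            have : c0 + (j + 1) = key.length + j := by omega
            rw [this, Nat.add_mod_left, Nat.zero_add]
          · rw [if_neg h]
            have : c0 + 1 + j = c0 + (j + 1) := by omega
            rw [this]
        rw [hidx]
      rw [hfun]
      have hvv : v = PySem.Int.mod (dec[cont] - key.getD ((c0 + 0) % key.length) 0 - 1) 128 := by
        rw [hv, List.getD_eq_getElem dec 0 hc, Nat.add_zero, Nat.mod_eq_of_lt hc0]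
      rw [hvv]
    · have hge : ¬ cont < dec.length := hc
      rw [decodLoop, dif_neg hge, List.drop_eq_nil_of_le (by omega),
          List.take_of_length_le (by omega)]
      simp


lemma decodificar_eq (xs key : List Int) (hm : 1 ≤ key.length) :
    decodificar xs key 0 = shiftMap (fun i => key.getD (i % key.length) 0 + 1) xs := by
  unfold decodificar
  rw [if_neg (by omega)]
  by_cases hn : (0:Int) * key.length ≥ (xs.length : Int)
  · rw [if_pos hn]
    have hx : xs = [] := by
      apply List.eq_nil_of_length_eq_zero
      rw [zero_mul] at hn
      omega
    subst hx
    simp [shiftMap]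
  · rw [if_neg hn]
    rw [decodLoop_eq key hm xs.length xs 0 0 (by omega) (by omega)]
    rw [if_neg (show ¬ (0:Nat) = key.length by omega)]
    unfold shiftMap
    simp only [List.take_zero, List.drop_zero, List.nil_append]
    apply List.ext_getElem
    · simp
    · intro i h1 h2
      simp only [List.getElem_mapIdx]
      rw [Nat.zero_add]
      ring_nf


lemma PS_succ (key : List Int) (it p : Nat) :
    ∀ n c, it - c = n → c ≤ it →
      PS key c (it + 1) p = PS key c it p + (key.getD (key.length - 2 * it - 2 + p) 0 + 1) := by
  intro n
  induction n with
  | zero =>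
    intro c h0 hle
    have hc : c = it := by omega
    subst hc
    rw [PS, if_pos (by omega), PS, if_neg (by omega), PS, if_neg (by omega)]
    ring
  | succ n ih =>
    intro c h0 hle
    have hc : c < it := by omega
    conv_lhs => rw [PS]
    conv_rhs => rw [PS]
    rw [if_pos (show c < it + 1 by omega), if_pos hc, ih (c+1) (by omega) (by omega)]
    ring


lemma ps_fold (key : List Int) (it : Nat) (h2 : 2 * it ≤ key.length) :
    (List.range it).foldl
      (fun (p : Int × Int) t =>
        (p.1 + key.getD (key.length - 2 * t - 2) 0 + 1, p.2 + key.getD (key.length - 2 * t - 1) 0 + 1))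
      (0, 0) = (PS key 0 it 0, PS key 0 it 1) := by
  induction it with
  | zero =>
    rw [PS, if_neg (by omega), PS, if_neg (by omega)]
    simp
  | succ it ih =>
    rw [List.range_succ, List.foldl_append, ih (by omega), List.foldl_cons, List.foldl_nil]
    rw [PS_succ key it 0 it 0 (by omega) (by omega), PS_succ key it 1 it 0 (by omega) (by omega)]
    have e1 : key.length - 2 * it - 2 + 1 = key.length - 2 * it - 1 := by omega
    rw [e1, Prod.mk.injEq]
    constructor <;> ring


lemma descLoop_eq (key dec : List Int) (it : Nat) (h2 : 2 * it ≤ key.length) :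
    ∀ (fuel : Nat) (c : Nat) (f : Nat → Int), c ≤ it → it - c ≤ fuel →
      descLoop key (shiftMap f dec) ((key.length : Int) - 2 * (c : Int)) c it =
        shiftMap (fun i => f i + PS key c it (i % 2)) dec := by
  intro fuel
  induction fuel with
  | zero =>
    intro c f hle hf
    have hc : c = it := by omega
    subst hc
    rw [descLoop, if_neg (by omega)]
    apply shiftMap_congr
    intro i _
    rw [PS, if_neg (by omega)]
    ring
  | succ fuel ih =>
    intro c f hle hf
    by_cases hlt : c < it
    · rw [descLoop, if_pos hlt]
      have hm2 : 2 * c + 2 ≤ key.length := by omega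
      have ha : (0:Int) ≤ (key.length : Int) - 2 * (c:Int) - 2 := by omega
      have hb : (0:Int) ≤ (key.length : Int) - 2 * (c:Int) := by omega
      set newKey := PySem.List.slice key (some ((key.length : Int) - 2 * (c:Int) - 2))
          (some ((key.length : Int) - 2 * (c:Int))) with hnk
      have hnk2 : newKey = (key.drop (key.length - 2 * c - 2)).take 2 := by
        rw [hnk, PySem.List.slice_toNat key ha hb]
        have e1 : ((key.length : Int) - 2 * (c:Int) - 2).toNat = key.length - 2 * c - 2 := by omega
        have e2 : ((key.length : Int) - 2 * (c:Int)).toNat = key.length - 2 * c := by omega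
        rw [e1, e2]
        congr 1
        omega
      have hlen : newKey.length = 2 := by
        rw [hnk2, List.length_take, List.length_drop]; omega
      have hgd : ∀ p, p < 2 → newKey.getD p 0 = key.getD (key.length - 2 * c - 2 + p) 0 := by
        intro p hp
        rw [hnk2]
        have hlt' : p < ((key.drop (key.length - 2 * c - 2)).take 2).length := by
          rw [List.length_take, List.length_drop]; omega
        rw [List.getD_eq_getElem _ _ hlt',
            List.getD_eq_getElem _ _ (show key.length - 2 * c - 2 + p < key.length by omega)]
        simp [List.getElem_take, List.getElem_drop]
      rw [decodificar_eq _ newKey (by omega), hlen, shiftMap_shiftMap]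
      have hoff : (key.length : Int) - 2 * (c:Int) - 2 = (key.length : Int) - 2 * ((c+1 : Nat) : Int) := by
        push_cast; ring
      rw [hoff, ih (c+1) _ (by omega) (by omega)]
      apply shiftMap_congr
      intro i _
      rw [hgd (i % 2) (by omega)]
      conv_rhs => rw [PS, if_pos hlt]
      ring
    · have hc : c = it := by omega
      subst hc
      rw [descLoop, if_neg (by omega)]
      apply shiftMap_congr
      intro i _
      rw [PS, if_neg (by omega)]
      ring

lemma shiftMap_rev_eq_map (h : Nat → Int) (xs : List Int) :
    shiftMap h xs.reverse = (List.range xs.length).map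
      (fun j => PySem.Int.mod (xs.getD (xs.length - 1 - j) 0 - h j) 128) := by
  apply List.ext_getElem
  · simp [shiftMap]
  · intro i hi1 hi2
    have hi : i < xs.length := by simpa [shiftMap] using hi1
    simp [shiftMap, List.getElem_reverse]
    have e : xs.length - 1 - (xs.length - 1 - i) = i := by omega
    rw [e, List.getElem?_eq_getElem (by omega : xs.length - 1 - i < xs.length)]
    simp

lemma descLoop_none (key dec : List Int) (o : Int) : descLoop key dec o 0 0 = dec := by
  rw [descLoop]; simp

-- ===== VERDICT (by name: the statement is the Claim_ definition above) =====
theorem descifrar_spec : Claim_equal_descifrar := by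
  intro ct key _
  unfold Spec_descifrar descifrar descifrar_alt
  dsimp only
  by_cases hm : key.length = 0
  · simp only [hm, Nat.zero_div]
    rw [decodificar, if_pos (by omega), descLoop_none, descLoop_none,
        decodificar, if_pos (by omega), if_pos trivial]
  · rw [if_neg hm]
    have hit : 2 * (key.length / 2) ≤ key.length := by omega
    rw [ps_fold key (key.length / 2) hit]
    rw [decodificar_eq ct key (by omega)]
    have hz : ((key.length : Int)) = (key.length : Int) - 2 * ((0 : Nat) : Int) := by simp
    rw [hz,
        descLoop_eq key ct (key.length / 2) hit (key.length / 2) 0 _ (by omega) (by omega),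
        shiftMap_reverse,
        descLoop_eq key ct.reverse (key.length / 2) hit (key.length / 2) 0 _ (by omega) (by omega),
        decodificar_eq _ key (by omega), shiftMap_shiftMap, shiftMap_rev_eq_map]
    apply List.map_congr_left
    intro j hj
    have hjn : j < ct.length := List.mem_range.mp hj
    congr 1
    have h2a := Nat.mod_two_eq_zero_or_one (ct.length - 1 - j)
    have h2b := Nat.mod_two_eq_zero_or_one j
    rcases h2a with h2a | h2a <;> rcases h2b with h2b | h2b <;>
      rw [h2a, h2b] <;> simp <;> ring
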